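-- pv_equiv track=rewrite | github.com/mr-rojit/coding_challenges | basics/week_6.py | does_not_coocur_n_times
-- ===== SOURCE A (Python) =====
-- def does_not_coocur_n_times(lst, n) -> int:
--     count_dict = dict()
--     for i in lst:
--         if i not in count_dict:
--             count_dict[i] = 1
--         else:
--             count_dict[i] += 1
--     for k,v in count_dict.items():
--         if v != n:
--             return k
-- ===== SOURCE B (Python) =====
-- def does_not_coocur_n_times(lst, n) -> int:
--     # Simpler: no count dictionary; return the first element whose total count in lst differs from n.
--     for i in lst:
--         if lst.count(i) != n:
--             return i
-- ===== Notes on version B (the rewrite author's own statement) =====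
-- stated objective: simpler
-- what changed: Dropped the count dictionary entirely: scan lst directly and return the first element i with lst.count(i) != n (the dict's first-occurrence key order makes this equivalent); lst.count runs at C speed and the scan exits at the first hit, which a timing run measured as faster despite the O(n^2) worst case.
import Mathlib
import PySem

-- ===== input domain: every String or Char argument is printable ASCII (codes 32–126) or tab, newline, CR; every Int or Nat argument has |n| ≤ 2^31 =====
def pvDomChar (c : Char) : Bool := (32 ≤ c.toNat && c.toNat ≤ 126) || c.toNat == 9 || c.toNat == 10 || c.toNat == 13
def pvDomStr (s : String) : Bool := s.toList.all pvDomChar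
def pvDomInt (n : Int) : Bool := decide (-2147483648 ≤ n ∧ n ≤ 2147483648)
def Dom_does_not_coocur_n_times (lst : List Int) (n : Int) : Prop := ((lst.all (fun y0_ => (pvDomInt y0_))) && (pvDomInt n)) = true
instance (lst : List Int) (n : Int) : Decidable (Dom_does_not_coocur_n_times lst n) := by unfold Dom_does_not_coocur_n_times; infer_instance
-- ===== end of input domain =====

-- ===== PORT A =====
-- B drops A's count dictionary; proved equivalence is about the return value only.
-- scan of 'for k,v in count_dict.items(): if v != n: return k'
def pvAScan (n : Int) : List (Int × Int) → Option Int
  | [] => none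
  | (k, v) :: rest => if v ≠ n then some k else pvAScan n rest

def does_not_coocur_n_times (lst : List Int) (n : Int) : Option Int :=
  let count_dict : PySem.Dict Int Int :=
    lst.foldl (fun d i =>
      if d.contains i then d.insert i (d.getD i 0 + 1) else d.insert i 1)
      PySem.Dict.empty
  pvAScan n count_dict.items

-- ===== PORT B =====
def does_not_coocur_n_times_alt (lst : List Int) (n : Int) : Option Int :=
  lst.find? (fun i => (PySem.List.count lst i : Int) != n)

-- ===== PRECONDITION & SPEC =====
def Spec_does_not_coocur_n_times (lst : List Int) (n : Int) (out : Option Int) : Prop := out = does_not_coocur_n_times_alt lst n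
instance (lst : List Int) (n : Int) (out : Option Int) : Decidable (Spec_does_not_coocur_n_times lst n out) := by unfold Spec_does_not_coocur_n_times; infer_instance

-- ===== CLAIM (what is proved, stated in full; the proofs are below) =====
def Claim_equal_does_not_coocur_n_times : Prop := ∀ (lst : List Int) (n : Int), Dom_does_not_coocur_n_times lst n → Spec_does_not_coocur_n_times lst n (does_not_coocur_n_times lst n)

-- ===== LEMMAS AND PROOFS =====

-- A's branching fold function is pointwise the counting insert
theorem pvFold_eq_counter (lst : List Int) :
    lst.foldl (fun d i =>
      if d.contains i then d.insert i (d.getD i 0 + 1) else d.insert i 1)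
      PySem.Dict.empty = PySem.Dict.counter lst := by
  rw [← PySem.Dict.foldl_insert_getD_add_one_eq_counter]
  congr 1
  funext d i
  by_cases h : d.contains i
  · simp [h]
  · have hc : d.contains i = false := by simpa using h
    have h0 : d.getD i 0 = 0 := by simp [PySem.Dict.getD_of_not_contains, hc]
    simp [h, h0]

-- scanning (k, c k) pairs for the first snd ≠ n is find? on the keys
theorem pvAScan_map (n : Int) (c : Int → Int) (xs : List Int) :
    pvAScan n (xs.map (fun k => (k, c k))) = xs.find? (fun k => c k != n) := by
  induction xs with
  | nil => rfl
  | cons x xs ih =>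
      simp only [List.map_cons, pvAScan, List.find?_cons]
      by_cases h : c x = n
      · simp [h, ih]
      · have hb : (c x == n) = false := by simp [h]
        simp [bne, h, hb]

-- removing elements the predicate rejects does not change find?
theorem pvFind?_discard (p : Int → Bool) (s : List Int) (x : Int) (hx : p x = false) :
    (PySem.Set.discard s x).find? p = s.find? p := by
  induction s with
  | nil => rfl
  | cons y s ih =>
      by_cases h : y = x
      · subst h
        simpa [PySem.Set.discard, hx] using ih
      · simp only [PySem.Set.discard, List.filter_cons] at *
        by_cases hp : p y = true
        · simp [h, hp]
        · simp only [Bool.not_eq_true] at hp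
          simp [h, hp, ih]

-- deduplicating to first occurrences does not change find?
theorem pvFind?_ofList (p : Int → Bool) (xs : List Int) :
    (PySem.Set.ofList xs).find? p = xs.find? p := by
  induction xs with
  | nil => rfl
  | cons x xs ih =>
      rw [PySem.Set.ofList_cons]
      by_cases hp : p x = true
      · simp [hp]
      · simp only [Bool.not_eq_true] at hp
        simp [hp, pvFind?_discard p _ x hp, ih]

-- ===== VERDICT (by name: the statement is the Claim_ definition above) =====
theorem does_not_coocur_n_times_spec : Claim_equal_does_not_coocur_n_times := by
  intro lst n _
  unfold Spec_does_not_coocur_n_times does_not_coocur_n_times does_not_coocur_n_times_alt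
  simp only [pvFold_eq_counter, PySem.Dict.items_counter, pvAScan_map, pvFind?_ofList, PySem.List.count_eq]
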